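-- pv_equiv track=rewrite | github.com/Karma-X-Inc/Shellcode-Hash-Collisions | djb2_collisions.py | next_string
-- ===== SOURCE A (Python) =====
-- def next_string(s: str) -> str:
--     charset = '0123456789abcdefghijklmnopqrstuvwxyzABCDEFGHIJKLMNOPQRSTUVWXYZ_'
--     if not s:
--         return charset[0]
--     s_list = list(s)
--     idx = len(s_list) - 1
--     while idx >= 0:
--         char_idx = charset.index(s_list[idx])
--         if char_idx < len(charset) - 1:
--             s_list[idx] = charset[char_idx + 1]
--             return ''.join(s_list)
--         else:
--             s_list[idx] = charset[0]
--             idx -= 1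
--     return charset[0] + ''.join(s_list)
-- ===== SOURCE B (Python) =====
-- def next_string(s: str) -> str:
--     charset = '0123456789abcdefghijklmnopqrstuvwxyzABCDEFGHIJKLMNOPQRSTUVWXYZ_'
--     if not s:
--         return charset[0]
--     stripped = s.rstrip('_')
--     if not stripped:
--         return '0' * (len(s) + 1)
--     return stripped[:-1] + charset[charset.index(stripped[-1]) + 1] + '0' * (len(s) - len(stripped))
-- ===== Notes on version B (the rewrite author's own statement) =====
-- stated objective: simpler
-- what changed: Replaced the right-to-left carry loop with in-place list mutation by a direct construction: rstrip the maximal-char '_' suffix, bump the last remaining character once, and append the matching run of '0's.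
import Mathlib
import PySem

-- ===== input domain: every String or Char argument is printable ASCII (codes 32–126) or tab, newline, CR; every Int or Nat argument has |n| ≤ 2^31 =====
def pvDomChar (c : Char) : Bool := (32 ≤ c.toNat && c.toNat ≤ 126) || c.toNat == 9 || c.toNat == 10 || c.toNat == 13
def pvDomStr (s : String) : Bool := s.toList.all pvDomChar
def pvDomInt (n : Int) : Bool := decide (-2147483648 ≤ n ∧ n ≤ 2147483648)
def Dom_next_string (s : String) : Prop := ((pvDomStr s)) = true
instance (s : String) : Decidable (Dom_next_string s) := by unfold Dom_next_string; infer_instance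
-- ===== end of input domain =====

-- B replaces A's right-to-left carry loop by rstrip-the-'_'-suffix and a direct rebuild (simpler).

def nsCharset : List Char := "0123456789abcdefghijklmnopqrstuvwxyzABCDEFGHIJKLMNOPQRSTUVWXYZ_".toList

-- ===== PORT A =====
-- A's while loop, walking the list from the right, becomes recursion on the reversed char list;
-- returns (final reversed list, whether the loop returned early).  On a char outside the charset
-- Python raises ValueError (excluded by Pre_); there idxOf returns the length and the port carries on.
def nsCarry (l : List Char) : List Char × Bool :=
  match l with
  | [] => ([], false)
  | c :: rest =>
    let ci := nsCharset.idxOf c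
    if ci < nsCharset.length - 1 then
      (nsCharset.getD (ci + 1) '0' :: rest, true)
    else
      let p := nsCarry rest
      ('0' :: p.1, p.2)

def next_string (s : String) : String :=
  if s.toList = [] then "0"
  else
    let p := nsCarry s.toList.reverse
    if p.2 then String.mk p.1.reverse else String.mk ('0' :: p.1.reverse)

-- ===== PORT B =====
-- Source B: rstrip('_') = drop the trailing run of '_'; then either all-max (overflow) or bump the last char.
def next_string_alt (s : String) : String :=
  if s.toList = [] then "0"
  else
    let stripped := (s.toList.reverse.dropWhile (fun c => c == '_')).reverse
    if stripped = [] then String.mk (List.replicate (s.toList.length + 1) '0')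
    else
      String.mk (stripped.dropLast
        ++ nsCharset.getD (nsCharset.idxOf (stripped.getLastD '0') + 1) '0'
        :: List.replicate (s.toList.length - stripped.length) '0')

-- ===== PRECONDITION & SPEC =====
-- Pre_ excludes exactly the inputs on which Python A raises ValueError: those where the
-- first character from the right that is not '_' lies outside the charset.
def Pre_next_string (s : String) : Prop :=
  (s.toList.reverse.dropWhile (fun c => c == '_')).headD '_' ∈ nsCharset
instance (s : String) : Decidable (Pre_next_string s) := by unfold Pre_next_string; infer_instance
def pvWitness_next_string : String := "ab_"

def Spec_next_string (s : String) (out : String) : Prop := out = next_string_alt s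
instance (s : String) (out : String) : Decidable (Spec_next_string s out) := by unfold Spec_next_string; infer_instance

-- ===== CLAIM (what is proved, stated in full; the proofs are below) =====
def Claim_equal_next_string : Prop := ∀ (s : String), Dom_next_string s → Pre_next_string s → Spec_next_string s (next_string s)

-- ===== LEMMAS AND PROOFS =====

theorem nsCharset_idxOf_underscore : nsCharset.idxOf '_' = 62 := by decide

theorem nsCharset_length : nsCharset.length = 63 := by decide

theorem nsCharset_mem_lt (c : Char) (h : c ∈ nsCharset) (hne : c ≠ '_') :
    nsCharset.idxOf c < 62 := by
  have hlt : nsCharset.idxOf c < nsCharset.length := List.idxOf_lt_length_of_mem h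
  rw [nsCharset_length] at hlt
  rcases Nat.lt_or_ge (nsCharset.idxOf c) 62 with h62 | h62
  · exact h62
  · exfalso
    have heq : nsCharset.idxOf c = 62 := by omega
    have hg : nsCharset[nsCharset.idxOf c]'(nsCharset_length ▸ hlt) = c :=
      List.getElem_idxOf _
    simp only [heq] at hg
    exact hne (by rw [← hg]; rfl)

theorem nsCarry_underscore (rest : List Char) :
    nsCarry ('_' :: rest) = ('0' :: (nsCarry rest).1, (nsCarry rest).2) := by
  simp [nsCarry, nsCharset_idxOf_underscore, nsCharset_length]

/-- The key characterisation of A's carry loop on a reversed list. -/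
theorem nsCarry_spec (l : List Char) :
    (l.dropWhile (fun c => c == '_') = [] →
        nsCarry l = (List.replicate l.length '0', false)) ∧
    (∀ c t, l.dropWhile (fun c => c == '_') = c :: t → c ∈ nsCharset →
        nsCarry l = (List.replicate (l.length - (c :: t).length) '0'
          ++ nsCharset.getD (nsCharset.idxOf c + 1) '0' :: t, true)) := by
  induction l with
  | nil =>
    constructor
    · intro _; rfl
    · intro c t h; simp [List.dropWhile] at h
  | cons d rest ih =>
    by_cases hd : d = '_'
    · subst hd
      have hdw : ('_' :: rest).dropWhile (fun c => c == '_')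
          = rest.dropWhile (fun c => c == '_') := by
        simp [List.dropWhile]
      constructor
      · intro h
        rw [hdw] at h
        rw [nsCarry_underscore, ih.1 h]
        simp [List.replicate_succ]
      · intro c t h hc
        rw [hdw] at h
        have hih := ih.2 c t h hc
        have hle : (c :: t).length ≤ rest.length := by
          have := List.length_dropWhile_le (p := fun c => c == '_') (l := rest)
          rw [h] at this; exact this
        rw [nsCarry_underscore, hih]
        have hlen : ('_' :: rest).length - (c :: t).length
            = (rest.length - (c :: t).length) + 1 := by
          simp only [List.length_cons] at *; omega
        rw [hlen, List.replicate_succ]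
        simp
    · have hbeq : (d == '_') = false := by simp [hd]
      have hdw : (d :: rest).dropWhile (fun c => c == '_') = d :: rest := by
        simp [List.dropWhile, hbeq]
      constructor
      · intro h; rw [hdw] at h; exact absurd h (by simp)
      · intro c t h hc
        rw [hdw] at h
        obtain ⟨hcd, htr⟩ := List.cons_eq_cons.mp h
        subst hcd; subst htr
        have hlt' : nsCharset.idxOf d < nsCharset.length - 1 := by
          have := nsCharset_mem_lt d hc hd
          rw [nsCharset_length]; omega
        simp [nsCarry, hlt']

-- ===== VERDICT (by name: the statement is the Claim_ definition above) =====
theorem next_string_spec : Claim_equal_next_string := by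
  intro s _ hpre
  unfold Spec_next_string
  unfold next_string next_string_alt
  by_cases hempty : s.toList = []
  · simp [hempty]
  · simp only [hempty, if_false]
    cases hdw : s.toList.reverse.dropWhile (fun c => c == '_') with
    | nil =>
      have hA := (nsCarry_spec s.toList.reverse).1 hdw
      rw [hA]
      simp [List.replicate_succ]
    | cons c t =>
      have hc : c ∈ nsCharset := by
        unfold Pre_next_string at hpre
        rw [hdw] at hpre
        simpa using hpre
      have hA := (nsCarry_spec s.toList.reverse).2 c t hdw hc
      rw [hA]
      have hle : (c :: t).length ≤ s.toList.reverse.length := by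
        have := List.length_dropWhile_le (p := fun c => c == '_') (l := s.toList.reverse)
        rw [hdw] at this; exact this
      have e1 : (c :: t).reverse = t.reverse ++ [c] := by simp
      rw [e1]
      have hne : t.reverse ++ [c] ≠ [] := by simp
      simp only [if_true, hne, if_false, List.reverse_append, List.reverse_cons,
        List.reverse_replicate, List.dropLast_concat, List.getLastD_concat,
        List.length_append, List.length_reverse, List.length_singleton]
      simp [List.length_cons, List.append_assoc]
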